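-- pv_equiv track=rewrite | github.com/smzoha/onuvuti-bot | src/utils.py | construct_vocab
-- ===== SOURCE A (Python) =====
-- marker_tokens = {
--     'pad_token': '<PAD>',
--     'start_token': '<SOS>',
--     'end_token': '<EOS>',
--     'unk_token': '<UNK>'
-- }
--
-- def construct_vocab(data, attrs):
--     word_counter = get_word_count(data, attrs)
--     vocab = {marker_tokens['pad_token']: 1}
--     counter = 2
--
--     for attr in attrs:
--         for line in data[attr]:
--             for word in str(line).split():
--                 if word not in vocab and word_counter[word] > 5:
--                     vocab[word] = counter
--                     counter += 1
--
--     for token in list(marker_tokens.values())[1:]: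
--         vocab[token] = counter
--         counter += 1
--
--     return vocab
--
-- def get_word_count(data, attrs):
--     word_counter = {}
--
--     for attr in attrs:
--         for line in data[attr]:
--             for word in str(line).split():
--                 if word not in word_counter:
--                     word_counter[word] = 1
--                 else:
--                     word_counter[word] = word_counter[word] + 1
--
--     return word_counter
-- ===== SOURCE B (Python) =====
-- marker_tokens = {
--     'pad_token': '<PAD>',
--     'start_token': '<SOS>',
--     'end_token': '<EOS>',
--     'unk_token': '<UNK>'
-- }
--
-- def construct_vocab(data, attrs):
--     # one flat pass: collect the word stream once, count it, then assign
--     # indices by a single sweep over the counter (first-occurrence order)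
--     words = [w for attr in attrs for line in data[attr] for w in str(line).split()]
--     word_counter = {}
--     for w in words:
--         word_counter[w] = word_counter.get(w, 0) + 1
--
--     vocab = {marker_tokens['pad_token']: 1}
--     counter = 2
--     for word, count in word_counter.items():
--         if count > 5 and word not in vocab:
--             vocab[word] = counter
--             counter += 1
--
--     for token in list(marker_tokens.values())[1:]:
--         vocab[token] = counter
--         counter += 1
--
--     return vocab
-- ===== Notes on version B (the rewrite author's own statement) =====
-- stated objective: simpler
-- what changed: B flattens the data into one word stream, counts it in a single flat loop, and assigns vocabulary indices in one pass over the counter's items (which are in first-occurrence order), instead of A's second triple-nested re-scan of attrs/lines/words with a membership test.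
import Mathlib
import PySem

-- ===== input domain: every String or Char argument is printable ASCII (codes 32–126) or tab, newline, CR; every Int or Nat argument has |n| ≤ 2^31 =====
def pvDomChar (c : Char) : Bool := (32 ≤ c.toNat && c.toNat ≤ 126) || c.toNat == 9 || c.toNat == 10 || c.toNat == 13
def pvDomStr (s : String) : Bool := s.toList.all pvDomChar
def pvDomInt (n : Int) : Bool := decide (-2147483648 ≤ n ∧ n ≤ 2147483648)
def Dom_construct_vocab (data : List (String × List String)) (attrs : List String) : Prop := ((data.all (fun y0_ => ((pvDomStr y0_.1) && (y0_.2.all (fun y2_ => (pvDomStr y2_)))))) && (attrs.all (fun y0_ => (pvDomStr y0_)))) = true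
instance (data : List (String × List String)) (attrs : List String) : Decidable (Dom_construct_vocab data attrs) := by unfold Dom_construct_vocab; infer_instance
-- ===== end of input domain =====

-- B replaces A's second triple-nested re-scan of the data by a single pass over the
-- word counter's items (same values in first-insertion order); objective: simpler.

-- ===== PORT A =====
-- module constant: list(marker_tokens.values()) = ["<PAD>", "<SOS>", "<EOS>", "<UNK>"]
def markerValues : List String := ["<PAD>", "<SOS>", "<EOS>", "<UNK>"]

-- data[attr]: missing keys (Python KeyError) are excluded by Pre_construct_vocab, so getD [] is exact there
def get_word_count (data : List (String × List String)) (attrs : List String) : PySem.Dict String Int :=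
  attrs.foldl (fun wc attr =>
    ((PySem.Dict.mk data).getD attr []).foldl (fun wc line =>
      (PySem.Str.split₀ line).foldl (fun wc word =>
        if !wc.contains word then wc.insert word 1
        else wc.insert word (wc.getD word 0 + 1)) wc) wc) PySem.Dict.empty

def construct_vocab (data : List (String × List String)) (attrs : List String) : List (String × Int) :=
  let word_counter := get_word_count data attrs
  let st :=
    attrs.foldl (fun st attr =>
      ((PySem.Dict.mk data).getD attr []).foldl (fun st line =>
        (PySem.Str.split₀ line).foldl (fun st word =>
          if !st.1.contains word && decide (word_counter.getD word 0 > 5) then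
            (st.1.insert word st.2, st.2 + 1)
          else st) st) st)
      ((PySem.Dict.empty.insert "<PAD>" 1 : PySem.Dict String Int), (2 : Int))
  let st := (markerValues.drop 1).foldl (fun st token => (st.1.insert token st.2, st.2 + 1)) st
  st.1.items

-- ===== PORT B =====
def construct_vocab_alt (data : List (String × List String)) (attrs : List String) : List (String × Int) :=
  let words := attrs.flatMap (fun attr =>
    ((PySem.Dict.mk data).getD attr []).flatMap (fun line => PySem.Str.split₀ line))
  let word_counter := words.foldl (fun d w => d.insert w (d.getD w 0 + 1))
    (PySem.Dict.empty : PySem.Dict String Int)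
  let st := word_counter.items.foldl (fun st p =>
      if decide (p.2 > 5) && !st.1.contains p.1 then (st.1.insert p.1 st.2, st.2 + 1) else st)
    ((PySem.Dict.empty.insert "<PAD>" 1 : PySem.Dict String Int), (2 : Int))
  let st := (markerValues.drop 1).foldl (fun st token => (st.1.insert token st.2, st.2 + 1)) st
  st.1.items

-- ===== PRECONDITION & SPEC =====
-- Pre_ excludes exactly the inputs where Python A raises KeyError: an attr absent from data.
def Pre_construct_vocab (data : List (String × List String)) (attrs : List String) : Prop :=
  ∀ attr ∈ attrs, (PySem.Dict.mk data).contains attr = true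
instance (data : List (String × List String)) (attrs : List String) : Decidable (Pre_construct_vocab data attrs) := by unfold Pre_construct_vocab; infer_instance

def pvWitness_construct_vocab : (List (String × List String)) × List String :=
  ([("a", ["x x x x x x y"])], ["a"])

def Spec_construct_vocab (data : List (String × List String)) (attrs : List String) (out : List (String × Int)) : Prop := out = construct_vocab_alt data attrs
instance (data : List (String × List String)) (attrs : List String) (out : List (String × Int)) : Decidable (Spec_construct_vocab data attrs out) := by unfold Spec_construct_vocab; infer_instance

-- ===== CLAIM (what is proved, stated in full; the proofs are below) =====
def Claim_equal_construct_vocab : Prop := ∀ (data : List (String × List String)) (attrs : List String), Dom_construct_vocab data attrs → Pre_construct_vocab data attrs → Spec_construct_vocab data attrs (construct_vocab data attrs)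

-- ===== LEMMAS AND PROOFS =====

-- the flattened word stream both programs process
def pvWords (data : List (String × List String)) (attrs : List String) : List String :=
  attrs.flatMap (fun attr =>
    ((PySem.Dict.mk data).getD attr []).flatMap (fun line => PySem.Str.split₀ line))

-- the "is frequent" test, fixed by the stream
def pvFreq (ws : List String) (w : String) : Bool := decide ((ws.count w : Int) > 5)

-- the vocab-building step with normalised guard
def pvStep (p : String → Bool) (st : PySem.Dict String Int × Int) (w : String) :
    PySem.Dict String Int × Int :=
  if p w && !st.1.contains w then (st.1.insert w st.2, st.2 + 1) else st

-- dedup of a list relative to an already-seen list, keeping first occurrences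
def pvDedup (seen : List String) : List String → List String
  | [] => []
  | w :: l => if seen.contains w then pvDedup seen l else w :: pvDedup (seen ++ [w]) l

theorem pvDedup_cons_mem {w : String} {s : List String} (l : List String) (h : w ∈ s) :
    pvDedup s (w :: l) = pvDedup s l := by simp [pvDedup, h]

theorem pvDedup_cons_not_mem {w : String} {s : List String} (l : List String) (h : w ∉ s) :
    pvDedup s (w :: l) = w :: pvDedup (s ++ [w]) l := by simp [pvDedup, h]

theorem pvDedup_congr (l : List String) : ∀ s₁ s₂ : List String,
    (∀ w ∈ l, w ∈ s₁ ↔ w ∈ s₂) → pvDedup s₁ l = pvDedup s₂ l := by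
  induction l with
  | nil => intro _ _ _; rfl
  | cons w l ih =>
    intro s₁ s₂ h
    have hw := h w (by simp)
    by_cases hm : w ∈ s₂
    · rw [pvDedup_cons_mem l hm, pvDedup_cons_mem l (hw.mpr hm)]
      exact ih s₁ s₂ (fun x hx => h x (by simp [hx]))
    · have hm₁ : w ∉ s₁ := fun hx => hm (hw.mp hx)
      rw [pvDedup_cons_not_mem l hm, pvDedup_cons_not_mem l hm₁]
      refine congrArg _ (ih _ _ ?_)
      intro x hx
      have := h x (by simp [hx])
      simp [List.mem_append, this]

theorem pvFoldl_add_eq_append_pvDedup (l : List String) : ∀ s : List String,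
    l.foldl PySem.Set.add s = s ++ pvDedup s l := by
  induction l with
  | nil => simp [pvDedup]
  | cons w l ih =>
    intro s
    by_cases hm : w ∈ s
    · rw [List.foldl_cons, pvDedup_cons_mem l hm]
      simp [PySem.Set.add, hm, ih s]
    · rw [List.foldl_cons, pvDedup_cons_not_mem l hm]
      simp [PySem.Set.add, hm, ih (s ++ [w])]

theorem pvSet_ofList_eq_pvDedup (l : List String) : PySem.Set.ofList l = pvDedup [] l := by
  rw [PySem.Set.ofList_eq_foldl, pvFoldl_add_eq_append_pvDedup]; rfl

theorem pvDedup_filter (p : String → Bool) (l : List String) : ∀ s : List String,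
    (pvDedup s l).filter p = pvDedup s (l.filter p) := by
  induction l with
  | nil => intro s; rfl
  | cons w l ih =>
    intro s
    by_cases hm : w ∈ s
    · rw [pvDedup_cons_mem l hm, ih s]
      by_cases hp : p w = true
      · rw [List.filter_cons_of_pos hp, pvDedup_cons_mem _ hm]
      · rw [List.filter_cons_of_neg (by simp_all)]
    · rw [pvDedup_cons_not_mem l hm]
      by_cases hp : p w = true
      · rw [List.filter_cons_of_pos hp, List.filter_cons_of_pos hp,
            pvDedup_cons_not_mem _ hm, ih (s ++ [w])]
      · rw [List.filter_cons_of_neg (by simp_all), List.filter_cons_of_neg (by simp_all),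
            ih (s ++ [w])]
        refine pvDedup_congr _ _ _ ?_
        intro x hx
        have hxw : x ≠ w := by
          rintro rfl
          have := List.of_mem_filter hx
          simp_all
        simp [hxw]

theorem pvDedup_pvDedup (m : List String) : ∀ s t : List String,
    (∀ x, x ∈ t → x ∈ s) → pvDedup s (pvDedup t m) = pvDedup s m := by
  induction m with
  | nil => intro _ _ _; rfl
  | cons w m ih =>
    intro s t h
    by_cases hct : w ∈ t
    · rw [pvDedup_cons_mem m hct, pvDedup_cons_mem m (h w hct), ih s t h]
    · rw [pvDedup_cons_not_mem m hct]
      by_cases hcs : w ∈ s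
      · rw [pvDedup_cons_mem _ hcs, pvDedup_cons_mem m hcs]
        refine ih s (t ++ [w]) ?_
        intro x hx
        rcases (by simpa using hx : x ∈ t ∨ x = w) with h1 | rfl
        · exact h x h1
        · exact hcs
      · rw [pvDedup_cons_not_mem _ hcs, pvDedup_cons_not_mem m hcs]
        refine congrArg _ (ih (s ++ [w]) (t ++ [w]) ?_)
        intro x hx
        rcases (by simpa using hx : x ∈ t ∨ x = w) with h1 | rfl
        · simp [h x h1]
        · simp

-- a fold whose step ignores elements failing p is a fold over the filtered list
theorem pvFoldl_filter_of_id {σ α : Type} (f : σ → α → σ) (p : α → Bool)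
    (hid : ∀ s a, p a = false → f s a = s) (l : List α) : ∀ init : σ,
    l.foldl f init = (l.filter p).foldl f init := by
  induction l with
  | nil => intro _; rfl
  | cons a l ih =>
    intro init
    by_cases hp : p a = true
    · rw [List.filter_cons_of_pos hp, List.foldl_cons, List.foldl_cons, ih]
    · simp only [Bool.not_eq_true] at hp
      rw [List.filter_cons_of_neg (by simp [hp]), List.foldl_cons, hid init a hp, ih]

-- the vocab fold over a stream of frequent words visits only its first occurrences
theorem pvFoldl_step_pvDedup (p : String → Bool) (l : List String) :
    ∀ (d : PySem.Dict String Int) (c : Int), (∀ w ∈ l, p w = true) →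
    l.foldl (pvStep p) (d, c) = (pvDedup d.keys l).foldl (pvStep p) (d, c) := by
  induction l with
  | nil => intro _ _ _; rfl
  | cons w l ih =>
    intro d c hp
    have hpw := hp w (by simp)
    by_cases hc : d.contains w = true
    · have hk : w ∈ d.keys := (PySem.Dict.contains_iff_mem_keys d w).mp hc
      rw [pvDedup_cons_mem l hk, List.foldl_cons,
          show pvStep p (d, c) w = (d, c) by simp [pvStep, hc]]
      exact ih d c (fun x hx => hp x (by simp [hx]))
    · have hc' : d.contains w = false := by simpa using hc
      have hk : w ∉ d.keys := fun hm => hc ((PySem.Dict.contains_iff_mem_keys d w).mpr hm)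
      rw [pvDedup_cons_not_mem l hk, List.foldl_cons, List.foldl_cons,
          show pvStep p (d, c) w = (d.insert w c, c + 1) by simp [pvStep, hc', hpw],
          ih (d.insert w c) (c + 1) (fun x hx => hp x (by simp [hx])),
          PySem.Dict.keys_insert_of_not_contains _ _ hc']

-- A's counting step equals B's counting step
theorem pvCount_step_eq :
    (fun (wc : PySem.Dict String Int) (word : String) =>
       if !wc.contains word then wc.insert word 1
       else wc.insert word (wc.getD word 0 + 1)) =
    (fun (d : PySem.Dict String Int) (w : String) => d.insert w (d.getD w 0 + 1)) := by
  funext wc word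
  by_cases hc : wc.contains word = true
  · simp [hc]
  · have hc' : wc.contains word = false := by simpa using hc
    simp [hc', PySem.Dict.getD_of_not_contains _ _ hc']

-- a triple-nested fold over attrs/lines/words is a fold over the flattened word stream
theorem pvNested_foldl {σ : Type} (data : List (String × List String)) (attrs : List String)
    (f : σ → String → σ) (init : σ) :
    attrs.foldl (fun s a => ((PySem.Dict.mk data).getD a []).foldl
        (fun s line => (PySem.Str.split₀ line).foldl f s) s) init =
    (pvWords data attrs).foldl f init := by
  unfold pvWords
  simp only [List.foldl_flatMap]

-- A's word counter is the counter of the flattened stream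
theorem pvGetWordCount_eq (data : List (String × List String)) (attrs : List String) :
    get_word_count data attrs = PySem.Dict.counter (pvWords data attrs) := by
  unfold get_word_count
  rw [pvNested_foldl, pvCount_step_eq, PySem.Dict.foldl_insert_getD_add_one_eq_counter]

-- the two main folds agree: the stream fold only acts at first occurrences
theorem pvMain_fold_eq (data : List (String × List String)) (attrs : List String) :
    (pvWords data attrs).foldl (pvStep (pvFreq (pvWords data attrs)))
      ((PySem.Dict.empty.insert "<PAD>" 1 : PySem.Dict String Int), (2 : Int)) =
    (PySem.Set.ofList (pvWords data attrs)).foldl (pvStep (pvFreq (pvWords data attrs)))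
      ((PySem.Dict.empty.insert "<PAD>" 1 : PySem.Dict String Int), (2 : Int)) := by
  set ws := pvWords data attrs
  set p := pvFreq ws
  have hid : ∀ (s : PySem.Dict String Int × Int) (a : String), p a = false → pvStep p s a = s := by
    intro s a hp; simp [pvStep, hp]
  rw [pvFoldl_filter_of_id _ p hid ws,
      pvFoldl_filter_of_id _ p hid (PySem.Set.ofList ws)]
  have hall : ∀ q : List String, ∀ w ∈ q.filter p, p w = true := by
    intro q w hw; exact List.of_mem_filter hw
  rw [pvFoldl_step_pvDedup p _ _ _ (hall ws),
      pvFoldl_step_pvDedup p _ _ _ (hall (PySem.Set.ofList ws))]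
  congr 1
  rw [pvSet_ofList_eq_pvDedup, pvDedup_filter,
      pvDedup_pvDedup _ _ [] (by intro x hx; simp at hx)]

theorem construct_vocab_eq_alt (data : List (String × List String)) (attrs : List String) :
    construct_vocab data attrs = construct_vocab_alt data attrs := by
  have hA :
      attrs.foldl (fun st attr =>
        ((PySem.Dict.mk data).getD attr []).foldl (fun st line =>
          (PySem.Str.split₀ line).foldl (fun st word =>
            if !st.1.contains word && decide ((get_word_count data attrs).getD word 0 > 5) then
              (st.1.insert word st.2, st.2 + 1)
            else st) st) st)
        ((PySem.Dict.empty.insert "<PAD>" 1 : PySem.Dict String Int), (2 : Int)) =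
      (pvWords data attrs).foldl (pvStep (pvFreq (pvWords data attrs)))
        ((PySem.Dict.empty.insert "<PAD>" 1 : PySem.Dict String Int), (2 : Int)) := by
    rw [pvNested_foldl]
    refine PySem.List.foldl_congr_mem _ _ _ _ (fun st word _ => ?_)
    simp [pvStep, pvFreq, pvGetWordCount_eq, PySem.Dict.getD_counter, Bool.and_comm]
  have hB :
      ((pvWords data attrs).foldl
          (fun d w => d.insert w (d.getD w 0 + 1))
          (PySem.Dict.empty : PySem.Dict String Int)).items.foldl
        (fun st p => if decide (p.2 > 5) && !st.1.contains p.1 then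
            (st.1.insert p.1 st.2, st.2 + 1) else st)
        ((PySem.Dict.empty.insert "<PAD>" 1 : PySem.Dict String Int), (2 : Int)) =
      (PySem.Set.ofList (pvWords data attrs)).foldl (pvStep (pvFreq (pvWords data attrs)))
        ((PySem.Dict.empty.insert "<PAD>" 1 : PySem.Dict String Int), (2 : Int)) := by
    rw [PySem.Dict.foldl_insert_getD_add_one_eq_counter, PySem.Dict.items_counter,
        List.foldl_map]
    rfl
  simp only [construct_vocab, construct_vocab_alt]
  rw [hA, pvMain_fold_eq, ← hB]
  rfl

-- ===== VERDICT (by name: the statement is the Claim_ definition above) =====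
theorem construct_vocab_spec : Claim_equal_construct_vocab := by
  intro data attrs _ _
  unfold Spec_construct_vocab
  exact construct_vocab_eq_alt data attrs
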